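-- pv_equiv track=rewrite | github.com/shuzeliu258/pfedgraph-three-tier | pfedgraph_cosine_avg_three-tier_3.py | make_server_groups_by_ntrainers
-- ===== SOURCE A (Python) =====
-- def make_server_groups_by_ntrainers(N_trainers, n_parties):
--     if sum(N_trainers) != n_parties:
--         raise ValueError(
--             f"N_trainers\' sum {sum(N_trainers)} must be equal to n_parties={n_parties}"
--         )
--
--     server_groups = []
--     cid = 0
--     for num in N_trainers:
--         server_groups.append(list(range(cid, cid + num)))
--         cid += num
--
--     return server_groups
-- ===== SOURCE B (Python) =====
-- from itertools import accumulate
--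
--
-- def make_server_groups_by_ntrainers(N_trainers, n_parties):
--     boundaries = list(accumulate(N_trainers, initial=0))
--     if boundaries[-1] != n_parties:
--         raise ValueError(
--             f"N_trainers\' sum {boundaries[-1]} must be equal to n_parties={n_parties}"
--         )
--     return [list(range(lo, hi)) for lo, hi in zip(boundaries, boundaries[1:])]
-- ===== Notes on version B (the rewrite author's own statement) =====
-- stated objective: alternative
-- what changed: Replaces the running cid accumulator loop with a precomputed prefix-sum boundary table (itertools.accumulate) followed by a pass over consecutive boundary pairs; the final boundary doubles as the sum for validation.
import Mathlib
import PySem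

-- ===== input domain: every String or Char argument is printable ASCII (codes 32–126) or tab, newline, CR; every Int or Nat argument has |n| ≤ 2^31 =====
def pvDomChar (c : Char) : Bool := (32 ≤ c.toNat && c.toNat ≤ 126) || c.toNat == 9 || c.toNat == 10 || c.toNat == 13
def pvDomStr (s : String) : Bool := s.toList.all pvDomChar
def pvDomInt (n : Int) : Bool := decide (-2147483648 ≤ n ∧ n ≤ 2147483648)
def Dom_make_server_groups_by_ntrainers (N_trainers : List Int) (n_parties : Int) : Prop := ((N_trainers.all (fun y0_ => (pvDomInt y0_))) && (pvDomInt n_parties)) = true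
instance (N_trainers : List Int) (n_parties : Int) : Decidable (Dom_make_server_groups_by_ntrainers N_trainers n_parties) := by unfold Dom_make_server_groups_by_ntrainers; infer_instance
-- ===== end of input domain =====

-- B replaces A's running-cid accumulator loop by a prefix-sum boundary table followed by a pass
-- pairing consecutive boundaries (objective: alternative decomposition; same cost).

-- ===== PORT A =====
-- the for-loop of A: threads the running cid through the list
def pvALoop : List Int → Int → List (List Int)
  | [], _ => []
  | num :: rest, cid => PySem.List.pyRange cid (cid + num) 1 :: pvALoop rest (cid + num)

def make_server_groups_by_ntrainers (N_trainers : List Int) (n_parties : Int) : List (List Int) :=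
  if N_trainers.sum ≠ n_parties then []  -- Python raises ValueError here; excluded by Pre_
  else pvALoop N_trainers 0

-- ===== PORT B =====
def make_server_groups_by_ntrainers_alt (N_trainers : List Int) (n_parties : Int) : List (List Int) :=
  let boundaries := List.scanl (· + ·) 0 N_trainers   -- accumulate(N_trainers, initial=0)
  -- boundaries[-1]: scanl is always nonempty, so getLastD is exact for the [-1] access
  if boundaries.getLastD 0 ≠ n_parties then []        -- Python raises ValueError here; excluded by Pre_
  else (boundaries.zip boundaries.tail).map (fun p => PySem.List.pyRange p.1 p.2 1)

-- ===== PRECONDITION & SPEC =====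
-- A raises ValueError when sum(N_trainers) != n_parties; exactly those inputs are excluded.
def Pre_make_server_groups_by_ntrainers (N_trainers : List Int) (n_parties : Int) : Prop :=
  N_trainers.sum = n_parties
instance (N_trainers : List Int) (n_parties : Int) : Decidable (Pre_make_server_groups_by_ntrainers N_trainers n_parties) := by unfold Pre_make_server_groups_by_ntrainers; infer_instance

def pvWitness_make_server_groups_by_ntrainers : List Int × Int := ([2, 3, 1], 6)

def Spec_make_server_groups_by_ntrainers (N_trainers : List Int) (n_parties : Int) (out : List (List Int)) : Prop := out = make_server_groups_by_ntrainers_alt N_trainers n_parties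
instance (N_trainers : List Int) (n_parties : Int) (out : List (List Int)) : Decidable (Spec_make_server_groups_by_ntrainers N_trainers n_parties out) := by unfold Spec_make_server_groups_by_ntrainers; infer_instance

-- ===== CLAIM (what is proved, stated in full; the proofs are below) =====
def Claim_equal_make_server_groups_by_ntrainers : Prop := ∀ (N_trainers : List Int) (n_parties : Int), Dom_make_server_groups_by_ntrainers N_trainers n_parties → Pre_make_server_groups_by_ntrainers N_trainers n_parties → Spec_make_server_groups_by_ntrainers N_trainers n_parties (make_server_groups_by_ntrainers N_trainers n_parties)

-- ===== LEMMAS AND PROOFS =====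

theorem pvScanl_getLastD (N : List Int) (c d : Int) :
    (List.scanl (· + ·) c N).getLastD d = c + N.sum := by
  induction N generalizing c d with
  | nil => simp
  | cons x xs ih =>
    rw [List.scanl_cons, List.getLastD_cons, ih, List.sum_cons]; ring

theorem pvALoop_eq_boundaries (N : List Int) (c : Int) :
    pvALoop N c =
      ((List.scanl (· + ·) c N).zip (List.scanl (· + ·) c N).tail).map
        (fun p => PySem.List.pyRange p.1 p.2 1) := by
  induction N generalizing c with
  | nil => simp [pvALoop]
  | cons x xs ih =>
    cases xs with
    | nil => simp [pvALoop, List.scanl]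
    | cons y ys =>
      rw [pvALoop, List.scanl_cons, List.scanl_cons, ih (c + x), List.scanl_cons]
      simp only [List.tail_cons, List.zip_cons_cons, List.map_cons]

-- ===== VERDICT (by name: the statement is the Claim_ definition above) =====
theorem make_server_groups_by_ntrainers_spec : Claim_equal_make_server_groups_by_ntrainers := by
  intro N n _ hpre
  unfold Spec_make_server_groups_by_ntrainers
  unfold make_server_groups_by_ntrainers make_server_groups_by_ntrainers_alt
  simp only [Pre_make_server_groups_by_ntrainers] at hpre
  simp only [pvScanl_getLastD, zero_add, hpre, ne_eq, not_true_eq_false, if_false]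
  exact pvALoop_eq_boundaries N 0
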